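-- pv_equiv track=rewrite | github.com/notmuch/notmuch | test/make-export.py | hexencode
-- ===== SOURCE A (Python) =====
-- def hexencode(str):
--     output_charset = "ABCDEFGHIJKLMNOPQRSTUVWXYZabcdefghijklmnopqrstuvwxyz0123456789+-_@=.,"
--     out = ""
--     for char in str:
--         if not char in output_charset:
--             out+= f"%{ord(char):x}"
--         else:
--             out+= char
--     return out
-- ===== SOURCE B (Python) =====
-- class _HexTable(dict):
--     """Translation table: identity for allowed chars, %x escape for anything else."""
--     def __missing__(self, code):
--         return "%%%x" % code
--
-- _TABLE = _HexTable(
--     (ord(c), c)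
--     for c in "ABCDEFGHIJKLMNOPQRSTUVWXYZabcdefghijklmnopqrstuvwxyz0123456789+-_@=.,"
-- )
--
-- def hexencode(str):
--     return str.translate(_TABLE)
-- ===== Notes on version B (the rewrite author's own statement) =====
-- stated objective: idiomatic
-- what changed: Replaces A's explicit per-character loop-and-branch accumulator by a single str.translate call over a precomputed translation table (a dict subclass whose __missing__ hex-escapes unlisted codes), so B contains no loop at all.
import Mathlib
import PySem

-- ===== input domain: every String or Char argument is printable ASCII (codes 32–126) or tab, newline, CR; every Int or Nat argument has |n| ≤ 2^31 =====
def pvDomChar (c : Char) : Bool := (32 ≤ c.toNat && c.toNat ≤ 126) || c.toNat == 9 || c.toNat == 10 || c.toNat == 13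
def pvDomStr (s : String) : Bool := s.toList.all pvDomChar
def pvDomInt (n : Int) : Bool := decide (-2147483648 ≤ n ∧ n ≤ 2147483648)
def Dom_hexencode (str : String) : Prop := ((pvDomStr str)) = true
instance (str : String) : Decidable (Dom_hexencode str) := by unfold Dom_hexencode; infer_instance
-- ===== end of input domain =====

-- B replaces A's explicit per-character accumulator loop by str.translate over a precomputed
-- translation table (identity entries for the 69 allowed codes, __missing__ hex-escaping the rest) — idiomatic, no explicit loop.

-- f"%{ord(char):x}": lowercase hex, no padding (Nat.toDigits 16 is exactly that)
def pvHex (n : Nat) : String := String.mk (Nat.toDigits 16 n)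

-- ===== PORT A =====
def hexencode (str : String) : String :=
  str.toList.foldl (fun out char =>
    if !("ABCDEFGHIJKLMNOPQRSTUVWXYZabcdefghijklmnopqrstuvwxyz0123456789+-_@=.,".toList.contains char) then
      out ++ "%" ++ pvHex char.toNat
    else
      out ++ String.singleton char) ""

-- ===== PORT B =====
-- the translation table _TABLE: code ↦ its (identity) replacement, for the 69 allowed characters
def pvTable : PySem.Dict Nat String :=
  PySem.Dict.ofList
    ("ABCDEFGHIJKLMNOPQRSTUVWXYZabcdefghijklmnopqrstuvwxyz0123456789+-_@=.,".toList.map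
      (fun c => (c.toNat, String.singleton c)))

-- str.translate(_TABLE): each character is replaced by _TABLE[ord(c)], __missing__ giving "%%%x" % code
def hexencode_alt (str : String) : String :=
  String.join (str.toList.map (fun c => pvTable.getD c.toNat ("%" ++ pvHex c.toNat)))

-- ===== PRECONDITION & SPEC =====
def Spec_hexencode (str : String) (out : String) : Prop := out = hexencode_alt str
instance (str : String) (out : String) : Decidable (Spec_hexencode str out) := by unfold Spec_hexencode; infer_instance

-- ===== CLAIM (what is proved, stated in full; the proofs are below) =====
def Claim_equal_hexencode : Prop := ∀ (str : String), Dom_hexencode str → Spec_hexencode str (hexencode str)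

-- ===== LEMMAS AND PROOFS =====

-- on the 128 ASCII codepoints the table lookup is exactly membership in A's charset string
theorem pv_table_get? : ∀ n : Nat, n < 128 →
    pvTable.get? n =
      (if "ABCDEFGHIJKLMNOPQRSTUVWXYZabcdefghijklmnopqrstuvwxyz0123456789+-_@=.,".toList.contains (Char.ofNat n)
       then some (String.singleton (Char.ofNat n)) else none) := by
  set_option maxRecDepth 8000 in decide

theorem pv_char_eq (c : Char) (h : pvDomChar c = true) :
    (if !("ABCDEFGHIJKLMNOPQRSTUVWXYZabcdefghijklmnopqrstuvwxyz0123456789+-_@=.,".toList.contains c) then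
      "%" ++ pvHex c.toNat
    else String.singleton c)
    = pvTable.getD c.toNat ("%" ++ pvHex c.toNat) := by
  have hlt : c.toNat < 128 := by
    simp [pvDomChar] at h
    omega
  have hg := pv_table_get? c.toNat hlt
  rw [Char.ofNat_toNat] at hg
  rw [PySem.Dict.getD_eq_get?_getD, hg]
  cases hc : "ABCDEFGHIJKLMNOPQRSTUVWXYZabcdefghijklmnopqrstuvwxyz0123456789+-_@=.,".toList.contains c <;>
    simp

theorem pv_foldl_str : ∀ (l : List String) (acc : String),
    l.foldl (fun r s => r ++ s) acc = acc ++ l.foldl (fun r s => r ++ s) "" := by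
  intro l
  induction l with
  | nil => intro acc; simp
  | cons x t ih =>
    intro acc
    simp only [List.foldl_cons]
    rw [ih (acc ++ x), ih ("" ++ x)]
    simp [String.append_assoc]

theorem pv_foldl_join (g : Char → String) : ∀ (l : List Char) (acc : String),
    l.foldl (fun o c => o ++ g c) acc = acc ++ String.join (l.map g) := by
  intro l
  induction l with
  | nil => intro acc; simp [String.join]
  | cons c t ih =>
    intro acc
    simp only [List.foldl_cons, List.map_cons, ih]
    simp only [String.join, List.foldl_cons, String.empty_append]
    rw [pv_foldl_str (t.map g) (g c), String.append_assoc]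

-- ===== VERDICT (by name: the statement is the Claim_ definition above) =====
set_option maxRecDepth 8000 in
theorem hexencode_spec : Claim_equal_hexencode := by
  intro str hdom
  unfold Spec_hexencode hexencode hexencode_alt
  have hA : (fun (out : String) (char : Char) =>
      if !("ABCDEFGHIJKLMNOPQRSTUVWXYZabcdefghijklmnopqrstuvwxyz0123456789+-_@=.,".toList.contains char) then
        out ++ "%" ++ pvHex char.toNat
      else out ++ String.singleton char)
     = (fun (out : String) (char : Char) => out ++
        (if !("ABCDEFGHIJKLMNOPQRSTUVWXYZabcdefghijklmnopqrstuvwxyz0123456789+-_@=.,".toList.contains char) then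
          "%" ++ pvHex char.toNat
        else String.singleton char)) := by
    funext out char
    split <;> simp [String.append_assoc]
  rw [hA, pv_foldl_join]
  simp only [String.empty_append]
  congr 1
  apply List.map_congr_left
  intro c hc
  have hdc : pvDomChar c = true := by
    have := (List.all_eq_true.mp hdom) c hc
    simpa using this
  exact pv_char_eq c hdc
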